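-- pv_equiv track=rewrite | github.com/FeatureSelectionAssociation/automatic-feature-selection | cut.py | greatestDiff
-- ===== SOURCE A (Python) =====
-- def greatestDiff(lst):
-- 	maxdiff=0
-- 	cutpos=0
-- 	for i in range(0,len(lst)-1):
-- 		diff = lst[i]-lst[i+1]
-- 		if(diff>maxdiff):
-- 			maxdiff = diff
-- 			cutpos = i+1
-- 	return cutpos
-- ===== SOURCE B (Python) =====
-- def greatestDiff(lst):
--     diffs = [a - b for a, b in zip(lst, lst[1:])]
--     best = max(diffs, default=0)
--     if best <= 0:
--         return 0
--     return diffs.index(best) + 1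
-- ===== Notes on version B (the rewrite author's own statement) =====
-- stated objective: alternative
-- what changed: Replaces the fused running-max index-loop with a three-phase decomposition: build the adjacent-differences table via zip, take its max (default 0), then look up the first index of that max.
import Mathlib
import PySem

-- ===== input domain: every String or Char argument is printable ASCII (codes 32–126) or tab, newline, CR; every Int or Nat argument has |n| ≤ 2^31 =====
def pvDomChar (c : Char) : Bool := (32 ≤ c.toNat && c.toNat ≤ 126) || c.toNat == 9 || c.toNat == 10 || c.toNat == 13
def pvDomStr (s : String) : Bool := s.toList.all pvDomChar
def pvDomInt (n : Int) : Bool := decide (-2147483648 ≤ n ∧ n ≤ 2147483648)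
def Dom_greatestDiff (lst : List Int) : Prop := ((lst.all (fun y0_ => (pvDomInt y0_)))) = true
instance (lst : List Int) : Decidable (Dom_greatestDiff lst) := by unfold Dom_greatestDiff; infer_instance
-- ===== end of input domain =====

-- B replaces A's fused running-max loop by a diffs table, a max with default 0, and a first-index lookup (objective: alternative decomposition).

-- ===== PORT A =====
def greatestDiff (lst : List Int) : Int :=
  (((PySem.List.pyRange 0 ((lst.length : Int) - 1) 1).foldl
      (fun (s : Int × Int) i =>
        let diff := PySem.List.pyGetD lst i 0 - PySem.List.pyGetD lst (i + 1) 0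
        if diff > s.1 then (diff, i + 1) else s)
      (0, 0))).2

-- ===== PORT B =====
-- diffs.index(best) is exact as (index? …).getD 0 here: it is only reached when best > 0,
-- and then best = max(diffs) is a member of diffs, so index? returns some.
def greatestDiff_alt (lst : List Int) : Int :=
  let diffs := (lst.zip (PySem.List.slice lst (some 1) none)).map (fun p => p.1 - p.2)
  let best := (PySem.List.max? diffs (fun y => y)).getD 0
  if best ≤ 0 then 0
  else (((PySem.List.index? diffs best).getD 0 : Nat) : Int) + 1

-- ===== PRECONDITION & SPEC =====
def Spec_greatestDiff (lst : List Int) (out : Int) : Prop := out = greatestDiff_alt lst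
instance (lst : List Int) (out : Int) : Decidable (Spec_greatestDiff lst out) := by unfold Spec_greatestDiff; infer_instance

-- ===== CLAIM (what is proved, stated in full; the proofs are below) =====
def Claim_equal_greatestDiff : Prop := ∀ (lst : List Int), Dom_greatestDiff lst → Spec_greatestDiff lst (greatestDiff lst)

-- ===== LEMMAS AND PROOFS =====

-- A's loop over the diffs table, with explicit stored position p for the current element.
def goA : List Int → Int → Int → Int → Int × Int
  | [], m, c, _ => (m, c)
  | d :: t, m, c, p => if d > m then goA t d p (p + 1) else goA t m c (p + 1)

lemma foldl_max_comm (t : List Int) : ∀ a b, t.foldl max (max a b) = max a (t.foldl max b) := by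
  induction t with
  | nil => intro a b; rfl
  | cons x t ih =>
    intro a b
    simp only [List.foldl_cons]
    rw [max_assoc, ih]

lemma goA_spec (D : List Int) : ∀ m c p,
    (goA D m c p).2 = if D.foldl max m ≤ m then c else p + (D.idxOf (D.foldl max m) : Int) := by
  induction D with
  | nil => intro m c p; simp [goA]
  | cons d t ih =>
    intro m c p
    simp only [goA, List.foldl_cons]
    by_cases hd : d > m
    · rw [if_pos hd, ih]
      have hmd : max m d = d := by omega
      rw [hmd]
      have hge : d ≤ t.foldl max d := (PySem.List.le_foldl_max t d).1
      by_cases hle : t.foldl max d ≤ d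
      · have heq : t.foldl max d = d := le_antisymm hle hge
        rw [if_pos hle, if_neg (by omega), heq, List.idxOf_cons_self]
        simp
      · rw [if_neg hle, if_neg (by omega), List.idxOf_cons_ne _ (by omega)]
        push_cast
        ring
    · rw [if_neg hd, ih]
      have hmd : max m d = m := by omega
      rw [hmd]
      by_cases hle : t.foldl max m ≤ m
      · rw [if_pos hle, if_pos hle]
      · rw [if_neg hle, if_neg hle, List.idxOf_cons_ne _ (by omega)]
        push_cast
        ring

lemma enumerate_foldl_eq_goA (D : List Int) : ∀ (s : Int × Int) (j : Int),
    (PySem.List.enumerate D j).foldl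
      (fun (s : Int × Int) (x : Int × Int) => if x.2 > s.1 then (x.2, x.1 + 1) else s) s
      = goA D s.1 s.2 (j + 1) := by
  induction D with
  | nil => intro s j; simp [PySem.List.enumerate_nil, goA]
  | cons d t ih =>
    intro s j
    rw [PySem.List.enumerate_cons, List.foldl_cons]
    simp only [goA]
    by_cases h : d > s.1
    · rw [if_pos h, ih, if_pos h]
    · rw [if_neg h, ih, if_neg h]

-- D[k] = lst[k] - lst[k+1] as a pyGetD fact, for in-range k.
lemma diffs_getD (lst : List Int) (i : Int) (h0 : 0 ≤ i)
    (h1 : i < (lst.length : Int) - 1) :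
    PySem.List.pyGetD ((lst.zip lst.tail).map (fun p => p.1 - p.2)) i 0
      = PySem.List.pyGetD lst i 0 - PySem.List.pyGetD lst (i + 1) 0 := by
  obtain ⟨k, rfl⟩ := Int.eq_ofNat_of_zero_le h0
  have hlen : (lst.zip lst.tail).length = lst.length - 1 := by
    rw [List.length_zip, List.length_tail]
    omega
  have hk : k < lst.length - 1 := by omega
  have hk1 : k < lst.length := by omega
  have hk2 : k + 1 < lst.length := by omega
  have h1' : ((k:Int) + 1) = ((k + 1 : Nat) : Int) := by push_cast; ring
  rw [h1', PySem.List.pyGetD_natCast, PySem.List.pyGetD_natCast, PySem.List.pyGetD_natCast]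
  rw [List.getD_eq_getElem _ _ (by simp only [List.length_map, hlen]; omega),
      List.getD_eq_getElem _ _ hk1, List.getD_eq_getElem _ _ hk2]
  simp only [List.getElem_map, List.getElem_zip]
  congr 1
  rw [List.getElem_tail]

lemma idxOf?_of_mem (l : List Int) (v : Int) (h : v ∈ l) :
    l.idxOf? v = some (l.idxOf v) := by
  induction l with
  | nil => simp at h
  | cons x t ih =>
    by_cases hx : x = v
    · subst hx; simp [List.idxOf?_cons, List.idxOf_cons_self]
    · rcases List.mem_cons.mp h with h | h
      · exact absurd h.symm hx
      · simp [List.idxOf?_cons, hx, ih h, beq_iff_eq]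

lemma main_eq (lst : List Int) : greatestDiff lst = greatestDiff_alt lst := by
  unfold greatestDiff greatestDiff_alt
  rw [PySem.List.slice_from_one]
  set D := (lst.zip lst.tail).map (fun p => p.1 - p.2) with hD
  have hlenD : (D.length : Int) = max ((lst.length : Int) - 1) 0 := by
    simp [hD, List.length_zip, List.length_tail]
    omega
  -- rewrite A's fold to a fold over enumerate D 0
  have hA : (((PySem.List.pyRange 0 ((lst.length : Int) - 1) 1).foldl
      (fun (s : Int × Int) i =>
        let diff := PySem.List.pyGetD lst i 0 - PySem.List.pyGetD lst (i + 1) 0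
        if diff > s.1 then (diff, i + 1) else s)
      (0, 0))).2 = (goA D 0 0 1).2 := by
    have hrange : PySem.List.pyRange 0 ((lst.length : Int) - 1) 1
        = PySem.List.pyRange 0 (D.length : Int) 1 := by
      rcases Nat.eq_zero_or_pos lst.length with h | h
      · have : (lst.length : Int) - 1 ≤ 0 := by omega
        rw [PySem.List.pyRange_one_eq_nil this, PySem.List.pyRange_one_eq_nil (by omega)]
      · congr 1; omega
    rw [hrange]
    have hcong : (PySem.List.pyRange 0 (D.length : Int) 1).foldl
        (fun (s : Int × Int) i =>
          let diff := PySem.List.pyGetD lst i 0 - PySem.List.pyGetD lst (i + 1) 0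
          if diff > s.1 then (diff, i + 1) else s) (0, 0)
        = (PySem.List.pyRange 0 (D.length : Int) 1).foldl
        (fun (s : Int × Int) i =>
          if PySem.List.pyGetD D i 0 > s.1 then (PySem.List.pyGetD D i 0, i + 1) else s)
          (0, 0) := by
      apply PySem.List.foldl_congr_mem
      intro s i hi
      rw [PySem.List.mem_pyRange_one] at hi
      have hiD : i < (lst.length : Int) - 1 := by
        have := hi.2
        omega
      simp only
      rw [diffs_getD lst i hi.1 hiD]
    rw [hcong]
    have henum := PySem.List.enumerate_eq_map_pyRange (xs := D) (d := 0)
    have : (PySem.List.pyRange 0 (D.length : Int) 1).foldl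
        (fun (s : Int × Int) i =>
          if PySem.List.pyGetD D i 0 > s.1 then (PySem.List.pyGetD D i 0, i + 1) else s)
          (0, 0)
        = (PySem.List.enumerate D 0).foldl
          (fun (s : Int × Int) (x : Int × Int) => if x.2 > s.1 then (x.2, x.1 + 1) else s)
          (0, 0) := by
      rw [henum, List.foldl_map]
      rfl
    rw [this, enumerate_foldl_eq_goA]
    norm_num
  rw [hA, goA_spec]
  show (if D.foldl max 0 ≤ 0 then (0:Int) else 1 + (D.idxOf (D.foldl max 0) : Int))
      = if ((PySem.List.max? D fun y => y).getD 0) ≤ 0 then 0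
        else (((PySem.List.index? D ((PySem.List.max? D fun y => y).getD 0)).getD 0 : Nat) : Int) + 1
  cases hDc : D with
  | nil => simp [PySem.List.max?]
  | cons d t =>
    rw [PySem.List.max?_id_cons]
    simp only [Option.getD_some]
    have hbest : (d :: t).foldl max 0 = max 0 (t.foldl max d) := by
      rw [List.foldl_cons]
      exact foldl_max_comm t 0 d
    by_cases hle : t.foldl max d ≤ 0
    · rw [if_pos (by omega), if_pos hle]
    · have hM : (d :: t).foldl max 0 = t.foldl max d := by rw [hbest]; omega
      rw [if_neg (by omega), if_neg hle, hM]
      have hmem : t.foldl max d ∈ d :: t :=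
        PySem.List.max?_mem (by rw [PySem.List.max?_id_cons])
      rw [PySem.List.index?_eq_idxOf?, idxOf?_of_mem _ _ hmem]
      simp only [Option.getD_some]
      ring

-- ===== VERDICT (by name: the statement is the Claim_ definition above) =====
theorem greatestDiff_spec : Claim_equal_greatestDiff := by
  intro lst _
  unfold Spec_greatestDiff
  exact main_eq lst
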